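-- pv_equiv track=rewrite | github.com/Kwang316/anatomy-atlas | viewer.py | _quiz_match
-- ===== SOURCE A (Python) =====
-- def _quiz_match(answer: str, correct: str) -> bool:
--     if not answer:
--         return False
--     a = answer.strip().lower()
--     c = correct.strip().lower()
--     if a == c or c in a:
--         return True
--     SKIP = {"left", "right", "upper", "lower"}
--     words = sorted(c.split(), key=len, reverse=True)
--     key_word = next((w for w in words if len(w) >= 4 and w not in SKIP), None)
--     return bool(key_word and key_word in a)
-- ===== SOURCE B (Python) =====
-- def _quiz_match(answer: str, correct: str) -> bool:
--     if not answer: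
--         return False
--     a = answer.strip().lower()
--     c = correct.strip().lower()
--     if a == c or c in a:
--         return True
--     words = c.split()
--     lens = [len(w) for w in words
--             if len(w) >= 4 and w not in ("left", "right", "upper", "lower")]
--     if not lens:
--         return False
--     top = max(lens)
--     for w in words:
--         if len(w) == top and w not in ("left", "right", "upper", "lower"):
--             return w in a
--     return False
-- ===== Notes on version B (the rewrite author's own statement) =====
-- stated objective: alternative
-- what changed: Replaced the length-descending sort plus first-match generator with two staged linear passes: first compute the maximum length among qualifying words, then return whether the first word of that length (not in the skip set) occurs in the answer; no sorting at all.
import Mathlib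
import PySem

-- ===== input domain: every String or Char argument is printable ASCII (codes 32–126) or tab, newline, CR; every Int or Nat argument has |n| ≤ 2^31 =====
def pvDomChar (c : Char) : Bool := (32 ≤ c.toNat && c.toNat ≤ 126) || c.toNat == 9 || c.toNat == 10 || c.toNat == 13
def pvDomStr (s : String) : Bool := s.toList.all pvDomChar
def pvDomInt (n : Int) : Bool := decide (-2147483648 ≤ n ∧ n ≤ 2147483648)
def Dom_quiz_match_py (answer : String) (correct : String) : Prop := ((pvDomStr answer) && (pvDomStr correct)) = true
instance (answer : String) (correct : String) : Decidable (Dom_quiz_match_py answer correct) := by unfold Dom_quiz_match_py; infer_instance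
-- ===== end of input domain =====

-- B replaces A's length-descending sort plus first-match selection by two staged
-- linear passes: max qualifying length first, then the first word of that length
-- (objective: alternative, no sort; same results).

-- ===== PORT A =====
def quiz_match_py (answer : String) (correct : String) : Bool :=
  if answer = "" then false
  else
    let a := PySem.Str.lower (PySem.Str.strip answer)
    let c := PySem.Str.lower (PySem.Str.strip correct)
    if a = c || PySem.Str.isIn c a then true
    else
      let skip : PySem.Set String := PySem.Set.ofList ["left", "right", "upper", "lower"]
      let words := PySem.List.sorted (PySem.Str.split₀ c) (fun w => PySem.Str.len w) true
      let keyWord := words.find? (fun w => decide (4 ≤ PySem.Str.len w) && !(skip.contains w))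
      match keyWord with
      | none => false
      | some w => PySem.Str.isIn w a   -- key_word has len ≥ 4, hence truthy

-- ===== PORT B =====
def quiz_match_py_alt (answer : String) (correct : String) : Bool :=
  if answer = "" then false
  else
    let a := PySem.Str.lower (PySem.Str.strip answer)
    let c := PySem.Str.lower (PySem.Str.strip correct)
    if a = c || PySem.Str.isIn c a then true
    else
      let words := PySem.Str.split₀ c
      let lens := (words.filter
          (fun w => decide (4 ≤ PySem.Str.len w) && !(["left", "right", "upper", "lower"].contains w))).map
          (fun w => PySem.Str.len w)
      match PySem.List.max? lens (fun x => x) with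
      | none => false
      | some top =>
          -- for w in words: if len(w) == top and w not in (...): return w in a
          match words.find? (fun w => decide (PySem.Str.len w = top) && !(["left", "right", "upper", "lower"].contains w)) with
          | none => false
          | some w => PySem.Str.isIn w a

-- ===== PRECONDITION & SPEC =====
def Spec_quiz_match_py (answer : String) (correct : String) (out : Bool) : Prop := out = quiz_match_py_alt answer correct
instance (answer : String) (correct : String) (out : Bool) : Decidable (Spec_quiz_match_py answer correct out) := by unfold Spec_quiz_match_py; infer_instance

-- ===== CLAIM (what is proved, stated in full; the proofs are below) =====
def Claim_equal_quiz_match_py : Prop := ∀ (answer : String) (correct : String), Dom_quiz_match_py answer correct → Spec_quiz_match_py answer correct (quiz_match_py answer correct)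

-- ===== LEMMAS AND PROOFS =====

-- First match in a key-descending list after one stable insertion, in terms of the
-- first match before the insertion.
theorem pv_find_insertBy {α : Type} (key : α → Int) (pred : α → Bool) (x : α) (l : List α)
    (hl : l.Pairwise (fun a b => key b ≤ key a)) :
    (PySem.List.insertBy (fun a b => decide (key b < key a)) x l).find? pred =
      match l.find? pred with
      | none => if pred x then some x else none
      | some m => if pred x && decide (key m < key x) then some x else some m := by
  induction l with
  | nil =>
      simp [PySem.List.insertBy, List.find?]
  | cons y ys ih =>
      have hy : ∀ z ∈ ys, key z ≤ key y := by
        intro z hz; exact (List.pairwise_cons.mp hl).1 z hz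
      have hys : ys.Pairwise (fun a b => key b ≤ key a) := (List.pairwise_cons.mp hl).2
      by_cases hb : key y < key x
      · -- x goes in front
        simp only [PySem.List.insertBy, hb, decide_true, if_true]
        rw [List.find?_cons]
        cases hpx : pred x with
        | true =>
            cases hfy : List.find? pred (y :: ys) with
            | none => simp
            | some m =>
                have hm := List.mem_of_find?_eq_some hfy
                have hkm : key m ≤ key y := by
                  rcases List.mem_cons.mp hm with rfl | hm'
                  · exact le_refl _
                  · exact hy _ hm'
                have hlt : key m < key x := lt_of_le_of_lt hkm hb
                simp [hlt]
        | false =>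
            cases hfy : List.find? pred (y :: ys) with
            | none => simp
            | some m => simp
      · -- x goes after y
        have hb' : (decide (key y < key x)) = false := by simp [hb]
        simp only [PySem.List.insertBy, hb', Bool.false_eq_true, if_false]
        rw [List.find?_cons, List.find?_cons]
        cases hpy : pred y with
        | true =>
            have hxy : key x ≤ key y := not_lt.mp hb
            have hcond : (pred x && decide (key y < key x)) = false := by
              simp [not_lt.mpr hxy]
            simp [hcond]
        | false =>
            exact ih hys

-- The selection A makes (sort by length descending, take the first qualifying word)
-- equals a single left-to-right best-keeping scan.
theorem pv_find_sorted_eq_scan {α : Type} (key : α → Int) (pred : α → Bool) (ws : List α) :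
    (PySem.List.sorted ws key true).find? pred =
      ws.foldl
        (fun b w =>
          if pred w && b.elim true (fun m => decide (key m < key w))
          then some w else b)
        none := by
  induction ws using List.reverseRecOn with
  | nil => simp [PySem.List.sorted]
  | append_singleton ws x ih =>
      rw [PySem.List.sorted_rev_eq_foldl_insertBy] at ih ⊢
      rw [List.foldl_append, List.foldl_append]
      simp only [List.foldl_cons, List.foldl_nil]
      have hpw : (List.foldl (fun acc x => PySem.List.insertBy (fun a b => decide (key b < key a)) x acc) [] ws).Pairwise
          (fun a b => key b ≤ key a) := by
        rw [← PySem.List.sorted_rev_eq_foldl_insertBy]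
        exact PySem.List.sorted_pairwise_rev ws key
      rw [pv_find_insertBy key pred x _ hpw, ih]
      cases hf : (List.foldl
          (fun b w => if pred w && b.elim true (fun m => decide (key m < key w)) then some w else b)
          none ws) with
      | none => cases hpx : pred x <;> simp
      | some m =>
          by_cases hpx : pred x = true
          · by_cases hlt : key m < key x
            · simp [hpx, hlt]
            · simp [hpx, hlt]
          · have : pred x = false := by revert hpx; cases pred x <;> simp
            simp [this]

-- Appending one value to a running max.
theorem pv_max_append (l : List Int) (v : Int) :
    PySem.List.max? (l ++ [v]) (fun x => x) =
      some ((PySem.List.max? l (fun x => x)).elim v (fun t => max t v)) := by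
  cases l with
  | nil =>
      rw [show PySem.List.max? ([] : List Int) (fun x => x) = none from
        (PySem.List.max?_eq_none_iff _ _).mpr rfl]
      simp [PySem.List.max?_id_cons]
  | cons h t =>
      rw [List.cons_append, PySem.List.max?_id_cons, PySem.List.max?_id_cons,
        List.foldl_append]
      simp

-- The best-keeping scan equals the staged computation: max of qualifying keys,
-- then first element with that key among the qualifying ones.
theorem pv_scan_eq_staged {α : Type} (key : α → Int) (pred : α → Bool) (ws : List α) :
    ws.foldl
        (fun b w =>
          if pred w && b.elim true (fun m => decide (key m < key w))
          then some w else b)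
        none =
      (PySem.List.max? ((ws.filter pred).map key) (fun x => x)).elim none
        (fun top => ws.find? (fun w => pred w && decide (key w = top))) := by
  induction ws using List.reverseRecOn with
  | nil =>
      simp only [List.filter_nil, List.map_nil, List.foldl_nil]
      rw [show PySem.List.max? ([] : List Int) (fun x => x) = none from
        (PySem.List.max?_eq_none_iff _ _).mpr rfl]
      rfl
  | append_singleton ws x ih =>
      rw [List.foldl_append]
      simp only [List.foldl_cons, List.foldl_nil]
      rw [ih, List.filter_append, List.map_append]
      cases hpx : pred x with
      | false =>
          simp only [List.filter_cons, hpx, Bool.false_eq_true, if_false, List.filter_nil,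
            List.map_nil, List.append_nil]
          cases hm : PySem.List.max? ((ws.filter pred).map key) (fun x => x) with
          | none => simp [hpx]
          | some top =>
              simp only [Option.elim_some]
              rw [List.find?_append]
              simp [hpx]
      | true =>
          simp only [List.filter_cons, hpx, if_pos, List.filter_nil, List.map_cons, List.map_nil]
          rw [pv_max_append]
          cases hm : PySem.List.max? ((ws.filter pred).map key) (fun x => x) with
          | none =>
              -- no qualifying word in ws
              have hfe : ws.filter pred = [] :=
                List.map_eq_nil_iff.mp ((PySem.List.max?_eq_none_iff _ _).mp hm)
              have hnone : ∀ top, List.find? (fun w => pred w && decide (key w = top)) ws = none := by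
                intro top
                rw [List.find?_eq_none]
                intro w hw
                have : pred w = false := by
                  by_contra hpw
                  have : w ∈ ws.filter pred := List.mem_filter.mpr ⟨hw, by revert hpw; cases pred w <;> simp⟩
                  rw [hfe] at this; exact absurd this (List.not_mem_nil)
                simp [this]
              simp only [Option.elim_none, Option.elim_some]
              rw [List.find?_append]
              simp [hnone, hpx]
          | some top =>
              -- ws has a qualifying word; its scan result is the first with key = top
              have hle : ∀ w ∈ ws, pred w = true → key w ≤ top := by
                intro w hw hpw
                have : key w ∈ (ws.filter pred).map key :=
                  List.mem_map.mpr ⟨w, List.mem_filter.mpr ⟨hw, hpw⟩, rfl⟩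
                simpa using PySem.List.max?_isMax hm _ this
              cases hfind : List.find? (fun w => pred w && decide (key w = top)) ws with
              | none =>
                  -- impossible: top attained by some member
                  exfalso
                  have htopmem : top ∈ (ws.filter pred).map key := PySem.List.max?_mem hm
                  rcases List.mem_map.mp htopmem with ⟨w, hwf, hkw⟩
                  rcases List.mem_filter.mp hwf with ⟨hw, hpw⟩
                  have := List.find?_eq_none.mp hfind w hw
                  simp [hpw, hkw] at this
              | some m =>
                  have hmp := List.find?_some hfind
                  have hkeym : key m = top :=
                    of_decide_eq_true ((Bool.and_eq_true _ _).mp hmp).2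
                  simp only [Option.elim_some]
                  simp only [hfind]
                  by_cases hgt : top < key x
                  · -- new max: key x; no earlier word attains it
                    simp only [max_eq_right (le_of_lt hgt)]
                    have hcond : (pred x && decide (key m < key x)) = true := by
                      simp [hpx, hkeym ▸ hgt]
                    have hnone : List.find? (fun w => pred w && decide (key w = key x)) ws = none := by
                      rw [List.find?_eq_none]
                      intro w hw
                      by_cases hpw : pred w = true
                      · have h1 : key w ≤ top := hle w hw hpw
                        have h2 : ¬ (key w = key x) := by omega
                        simp [h2]
                      · have : pred w = false := by revert hpw; cases pred w <;> simp
                        simp [this]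
                    simp only [List.find?_append] at *
                    simp [hnone, hpx]
                    intro h
                    omega
                  · -- max unchanged; find? stops at m as before
                    simp only [max_eq_left (not_lt.mp hgt)]
                    have hcond : (pred x && decide (key m < key x)) = false := by
                      have : ¬ (key m < key x) := by rw [hkeym]; exact hgt
                      simp [this]
                    rw [List.find?_append]
                    simp [hfind]
                    intro h
                    omega

-- The Python set literal behaves as the 4-word list in the qualifying predicate.
theorem pv_pred_eq :
    (fun w => decide (4 ≤ PySem.Str.len w) && !((PySem.Set.ofList ["left", "right", "upper", "lower"] : PySem.Set String).contains w)) =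
    (fun w => decide (4 ≤ PySem.Str.len w) && !(["left", "right", "upper", "lower"].contains w)) := by
  have h : (PySem.Set.ofList ["left", "right", "upper", "lower"] : PySem.Set String) =
      (["left", "right", "upper", "lower"] : List String) := by decide
  funext w
  rw [h]
  rfl

-- ===== VERDICT (by name: the statement is the Claim_ definition above) =====
theorem quiz_match_py_spec : Claim_equal_quiz_match_py := by
  intro answer correct _
  unfold Spec_quiz_match_py
  show quiz_match_py answer correct = quiz_match_py_alt answer correct
  by_cases h0 : answer = ""
  · simp only [quiz_match_py, quiz_match_py_alt, if_pos h0]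
  · simp only [quiz_match_py, quiz_match_py_alt, if_neg h0]
    by_cases h1 : (decide (PySem.Str.lower (PySem.Str.strip answer) = PySem.Str.lower (PySem.Str.strip correct)) ||
        PySem.Str.isIn (PySem.Str.lower (PySem.Str.strip correct)) (PySem.Str.lower (PySem.Str.strip answer))) = true
    · rw [if_pos h1, if_pos h1]
    · rw [if_neg h1, if_neg h1]
      set a := PySem.Str.lower (PySem.Str.strip answer)
      set c := PySem.Str.lower (PySem.Str.strip correct)
      set pred := fun w => decide (4 ≤ PySem.Str.len w) && !(["left", "right", "upper", "lower"].contains w) with hpred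
      rw [pv_pred_eq, pv_find_sorted_eq_scan (fun w => PySem.Str.len w) pred (PySem.Str.split₀ c),
        pv_scan_eq_staged]
      cases hm : PySem.List.max? (((PySem.Str.split₀ c).filter pred).map (fun w => PySem.Str.len w)) (fun x => x) with
      | none => rfl
      | some top =>
          -- top ≥ 4, so the two find? predicates coincide pointwise
          have htop4 : 4 ≤ top := by
            have htopmem := PySem.List.max?_mem hm
            rcases List.mem_map.mp htopmem with ⟨w, hwf, hkw⟩
            rcases List.mem_filter.mp hwf with ⟨_, hpw⟩
            have := (Bool.and_eq_true _ _).mp hpw |>.1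
            have := of_decide_eq_true this
            omega
          have hpe : (fun w => pred w && decide (PySem.Str.len w = top)) =
              (fun w => decide (PySem.Str.len w = top) && !(["left", "right", "upper", "lower"].contains w)) := by
            funext w
            by_cases hl : PySem.Str.len w = top
            · simp only [hpred]
              simp [PySem.Str.len] at hl
              simp [hl, htop4, Bool.and_comm]
            · simp only [hpred]
              simp [PySem.Str.len] at hl
              simp [hl]
          simp only [Option.elim_some]
          simp only [hpe]
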